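-- pv_equiv track=rewrite | github.com/AraMilagros/Python-PB | Python-PB/Ejercicios/Ejercicio_obligatorio2/Helpers(1ro).py | ConvertirAcentos
-- ===== SOURCE A (Python) =====
-- def ConvertirAcentos(palabra, acentos):#REHACER
--     pconvertido=''
--     bandera=False
--     for caracter in palabra:
--         for i in acentos:
--             if caracter == i:
--                 pconvertido = palabra.replace(caracter, acentos[i])
--                 bandera=True
--     return pconvertido, bandera #retorna string sin acento, y una bandera que aumente
-- ===== SOURCE B (Python) =====
-- def ConvertirAcentos(palabra, acentos):
--     # Scan the word right-to-left and stop at the first character that is a key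
--     # of the dict: that is the last-matching character A's overwriting loop keeps.
--     for caracter in reversed(palabra):
--         if caracter in acentos:
--             return palabra.replace(caracter, acentos[caracter]), True
--     return '', False
-- ===== Notes on version B (the rewrite author's own statement) =====
-- stated objective: faster
-- what changed: Instead of scanning every character left-to-right with an inner loop over the dict keys and re-doing the replace at every match into an overwriting accumulator, B scans the word right-to-left and returns at the first character that is a dict key (the last match A keeps): one O(1) hash lookup per char, one replace, early exit.
import Mathlib
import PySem

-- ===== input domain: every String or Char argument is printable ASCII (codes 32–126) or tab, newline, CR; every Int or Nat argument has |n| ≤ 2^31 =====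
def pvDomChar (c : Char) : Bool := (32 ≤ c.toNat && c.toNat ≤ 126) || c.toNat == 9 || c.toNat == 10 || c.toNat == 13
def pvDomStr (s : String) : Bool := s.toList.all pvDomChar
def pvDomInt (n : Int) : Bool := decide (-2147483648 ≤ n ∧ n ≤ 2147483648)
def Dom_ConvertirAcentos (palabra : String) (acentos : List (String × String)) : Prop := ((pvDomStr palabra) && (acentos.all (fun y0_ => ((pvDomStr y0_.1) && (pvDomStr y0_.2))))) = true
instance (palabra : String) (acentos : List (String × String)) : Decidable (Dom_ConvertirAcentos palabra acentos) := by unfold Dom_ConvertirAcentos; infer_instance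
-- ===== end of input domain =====

-- B scans the word right-to-left and returns at the first dict-key character (the
-- last match A's overwriting nested loop keeps): no inner key scan, no repeated replace, early exit (measured faster in a timing run).

-- ===== PORT A =====
-- Literal port of A: for each character, an inner scan over the dict's entries;
-- on a key match the accumulator is overwritten with (palabra.replace(c, acentos[c]), True).
-- `acentos[i]` is ported as `getD … ""`: the key `i.1` is an entry of the dict, so
-- Python's lookup never raises and the default is never used.
def ConvertirAcentos (palabra : String) (acentos : List (String × String)) : String × Bool :=
  palabra.toList.foldl
    (fun st caracter =>
      acentos.foldl
        (fun st2 i =>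
          if String.ofList [caracter] == i.1 then
            (PySem.Str.replace palabra (String.ofList [caracter])
              (PySem.Dict.getD (PySem.Dict.mk acentos) i.1 ""), true)
          else st2)
        st)
    ("", false)

-- ===== PORT B =====
-- B's loop: walk the reversed character list; the first character that is a key of the
-- dict (`caracter in acentos` + `acentos[caracter]` ported as one `get?`) returns early.
def pvLoopB (palabra : String) (acentos : List (String × String)) : List Char → String × Bool
  | [] => ("", false)
  | c :: rest =>
    match (PySem.Dict.mk acentos).get? (String.ofList [c]) with
    | some v => (PySem.Str.replace palabra (String.ofList [c]) v, true)
    | none => pvLoopB palabra acentos rest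

def ConvertirAcentos_alt (palabra : String) (acentos : List (String × String)) : String × Bool :=
  pvLoopB palabra acentos palabra.toList.reverse

-- ===== PRECONDITION & SPEC =====
def Spec_ConvertirAcentos (palabra : String) (acentos : List (String × String)) (out : String × Bool) : Prop := out = ConvertirAcentos_alt palabra acentos
instance (palabra : String) (acentos : List (String × String)) (out : String × Bool) : Decidable (Spec_ConvertirAcentos palabra acentos out) := by unfold Spec_ConvertirAcentos; infer_instance

-- ===== CLAIM (what is proved, stated in full; the proofs are below) =====
def Claim_equal_ConvertirAcentos : Prop := ∀ (palabra : String) (acentos : List (String × String)), Dom_ConvertirAcentos palabra acentos → Spec_ConvertirAcentos palabra acentos (ConvertirAcentos palabra acentos)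

-- ===== LEMMAS AND PROOFS =====

-- One step of A's outer loop, written as B's branch shape.
def pvStep (palabra : String) (acentos : List (String × String)) (st : String × Bool) (c : Char) : String × Bool :=
  match (PySem.Dict.mk acentos).get? (String.ofList [c]) with
  | some v => (PySem.Str.replace palabra (String.ofList [c]) v, true)
  | none => st

-- B's loop with an explicit "no match so far" seed, for the induction.
def pvLoopAux (palabra : String) (acentos : List (String × String)) : List Char → (String × Bool) → String × Bool
  | [], st => st
  | c :: rest, st =>
    match (PySem.Dict.mk acentos).get? (String.ofList [c]) with
    | some v => (PySem.Str.replace palabra (String.ofList [c]) v, true)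
    | none => pvLoopAux palabra acentos rest st

-- A fold that overwrites on `s == i.1` with a value depending only on `i.1`:
-- last write wins, and every write carries the same value `G s`.
theorem pv_foldl_if_fst {β : Type} (s : String) (G : String → β) :
    ∀ (L : List (String × String)) (st : β),
      L.foldl (fun st2 i => if s == i.1 then G i.1 else st2) st =
      if L.any (fun i => s == i.1) then G s else st := by
  intro L
  induction L with
  | nil => intro st; simp
  | cons i L ih =>
    intro st
    rw [List.foldl_cons, ih, List.any_cons]
    by_cases h : s = i.1
    · subst h; simp
    · have hb : (s == i.1) = false := by simp [h]
      rw [hb, Bool.false_or]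
      simp

-- First-match lookup in the dict agrees with "some entry's key equals s".
theorem pv_get?_any (s : String) :
    ∀ (L : List (String × String)),
      ((PySem.Dict.mk L).get? s).isSome = L.any (fun i => s == i.1) := by
  intro L
  induction L with
  | nil => simp [PySem.Dict.get?]
  | cons i L ih =>
    rw [PySem.Dict.get?_mk_cons, List.any_cons]
    by_cases h : s = i.1
    · subst h; simp
    · have h1 : (i.1 == s) = false := by
        rw [beq_eq_false_iff_ne]; exact fun e => h e.symm
      have h2 : (s == i.1) = false := by rw [beq_eq_false_iff_ne]; exact h
      simp [h1, h2, ih]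

-- A's inner scan over the dict entries IS one step of B's branch.
theorem pv_inner_eq (palabra : String) (acentos : List (String × String)) (c : Char) (st : String × Bool) :
    acentos.foldl
      (fun st2 i =>
        if String.ofList [c] == i.1 then
          (PySem.Str.replace palabra (String.ofList [c])
            (PySem.Dict.getD (PySem.Dict.mk acentos) i.1 ""), true)
        else st2) st
    = pvStep palabra acentos st c := by
  rw [pv_foldl_if_fst (String.ofList [c])
      (fun k => (PySem.Str.replace palabra (String.ofList [c]) (PySem.Dict.getD (PySem.Dict.mk acentos) k ""), true))]
  have hany := pv_get?_any (String.ofList [c]) acentos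
  unfold pvStep
  cases hg : (PySem.Dict.mk acentos).get? (String.ofList [c]) with
  | none =>
    have hA : (acentos.any fun i => String.ofList [c] == i.1) = false := by
      rw [← hany, hg]; rfl
    rw [hA]; simp
  | some v =>
    have hA : (acentos.any fun i => String.ofList [c] == i.1) = true := by
      rw [← hany, hg]; rfl
    rw [hA]
    simp [PySem.Dict.getD, hg]

-- Appending one character on the right of B's scan is one A-step on the seed.
theorem pv_loopAux_append (palabra : String) (acentos : List (String × String)) :
    ∀ (xs : List Char) (c : Char) (st : String × Bool),
      pvLoopAux palabra acentos (xs ++ [c]) st = pvLoopAux palabra acentos xs (pvStep palabra acentos st c) := by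
  intro xs
  induction xs with
  | nil =>
    intro c st
    simp only [List.nil_append, pvLoopAux, pvStep]
  | cons x xs ih =>
    intro c st
    simp only [List.cons_append, pvLoopAux]
    cases (PySem.Dict.mk acentos).get? (String.ofList [x]) with
    | none => exact ih c st
    | some v => rfl

-- A's outer overwriting fold equals B's right-to-left early-exit scan.
theorem pv_foldl_eq_loopAux (palabra : String) (acentos : List (String × String)) :
    ∀ (cs : List Char) (st : String × Bool),
      cs.foldl (pvStep palabra acentos) st = pvLoopAux palabra acentos cs.reverse st := by
  intro cs
  induction cs with
  | nil => intro st; simp [pvLoopAux]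
  | cons c cs ih =>
    intro st
    rw [List.foldl_cons, ih, List.reverse_cons, pv_loopAux_append]

theorem pv_loopB_eq_loopAux (palabra : String) (acentos : List (String × String)) :
    ∀ (cs : List Char), pvLoopB palabra acentos cs = pvLoopAux palabra acentos cs ("", false) := by
  intro cs
  induction cs with
  | nil => rfl
  | cons c cs ih =>
    simp only [pvLoopB, pvLoopAux]
    cases (PySem.Dict.mk acentos).get? (String.ofList [c]) with
    | none => exact ih
    | some v => rfl

-- ===== VERDICT (by name: the statement is the Claim_ definition above) =====
theorem ConvertirAcentos_spec : Claim_equal_ConvertirAcentos := by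
  intro palabra acentos _
  unfold Spec_ConvertirAcentos ConvertirAcentos ConvertirAcentos_alt
  have hfun : (fun st caracter =>
      acentos.foldl
        (fun st2 i =>
          if String.ofList [caracter] == i.1 then
            (PySem.Str.replace palabra (String.ofList [caracter])
              (PySem.Dict.getD (PySem.Dict.mk acentos) i.1 ""), true)
          else st2)
        st) = pvStep palabra acentos := by
    funext st c
    exact pv_inner_eq palabra acentos c st
  rw [hfun, pv_foldl_eq_loopAux, pv_loopB_eq_loopAux]
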